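-- pv_equiv track=rewrite | github.com/Kblz13/CodigosClases | Sumar Numeros pares en lista.py | sumaImparesPares
-- ===== SOURCE A (Python) =====
-- def sumaImparesPares(lista1,lista2):
--     #validar numeros en lista
--     for numeros in lista2:
--         if isinstance(numeros,int)==False:#si el numero no es un entero
--             return "La lista debe contener solo numeros enteros"
--     for numero in lista1:
--         if isinstance(numero,int):
--             pass
--         else:
--             return "La lista debe ser de numeros enteros"
--     if isinstance(lista1,list) and isinstance(lista2,list):
--         if lista1==[] and lista2==[]:
--             return []
--         else:
--             return (sumaux(lista1,lista2))
--
-- def sumaux(lista1,lista2):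
--     par=0
--     impar=0
--     resultado=[]
--     indice=0
--     for elemento in lista1:
--         indice+=1
--         if indice%2==0:
--             par+=elemento
--         else:
--             impar+=elemento
--     indice=0
--     for elemento in lista2:
--         indice+=1
--         if indice%2==0:
--             par+=elemento
--         else:
--             impar+=elemento
--     resultado=[par,impar]
--     return resultado
-- ===== SOURCE B (Python) =====
-- def sumaImparesPares(lista1, lista2):
--     for numeros in lista2:
--         if not isinstance(numeros, int):
--             return "La lista debe contener solo numeros enteros"
--     for numero in lista1:
--         if not isinstance(numero, int):
--             return "La lista debe ser de numeros enteros"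
--     if isinstance(lista1, list) and isinstance(lista2, list):
--         if lista1 == [] and lista2 == []:
--             return []
--         i1, p1 = _pairs(lista1)
--         i2, p2 = _pairs(lista2)
--         return [p1 + p2, i1 + i2]
--
-- def _pairs(lista):
--     # consume the list two elements at a time: first of each pair -> impar, second -> par
--     impar = 0
--     par = 0
--     it = iter(lista)
--     for x in it:
--         impar += x
--         par += next(it, 0)
--     return impar, par
-- ===== Notes on version B (the rewrite author's own statement) =====
-- stated objective: alternative
-- what changed: Replaces the running indice counter with its %2 parity test (carried across both lists) by a pairwise pass that consumes each list two elements at a time, adding the first of each pair to impar and the second to par, combining the two lists' partial sums at the end.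
import Mathlib
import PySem

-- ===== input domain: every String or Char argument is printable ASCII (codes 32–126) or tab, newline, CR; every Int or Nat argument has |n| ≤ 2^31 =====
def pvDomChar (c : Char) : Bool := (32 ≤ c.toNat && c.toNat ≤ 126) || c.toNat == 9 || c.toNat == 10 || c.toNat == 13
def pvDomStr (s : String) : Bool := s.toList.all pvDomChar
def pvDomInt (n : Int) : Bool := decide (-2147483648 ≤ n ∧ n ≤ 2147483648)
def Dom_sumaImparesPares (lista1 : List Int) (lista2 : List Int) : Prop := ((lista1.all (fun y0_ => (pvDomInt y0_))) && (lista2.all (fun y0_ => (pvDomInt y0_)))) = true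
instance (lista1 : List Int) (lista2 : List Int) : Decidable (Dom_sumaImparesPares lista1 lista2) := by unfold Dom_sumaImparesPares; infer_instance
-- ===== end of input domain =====

-- B replaces A's running index counter (+ %2 test) by a pairwise two-at-a-time pass; same cost, different decomposition.
-- On List Int arguments A's isinstance-validation loops never fire and both isinstance(listX,list) gates hold,
-- so the string-returning and None-returning branches are unreachable and do not appear in the ports.

-- ===== PORT A =====
-- the for-loop of sumaux: state (par, impar, indice), indice incremented before the parity test
def pvSumauxLoop (xs : List Int) (par impar indice : Int) : Int × Int × Int :=
  xs.foldl (fun (s : Int × Int × Int) e =>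
    let p := s.1; let i := s.2.1; let ind := s.2.2 + 1
    if PySem.Int.mod ind 2 = 0 then (p + e, i, ind) else (p, i + e, ind))
    (par, impar, indice)

def pvSumaux (lista1 lista2 : List Int) : List Int :=
  let r1 := pvSumauxLoop lista1 0 0 0
  let r2 := pvSumauxLoop lista2 r1.1 r1.2.1 0   -- indice reset to 0, par/impar carried over
  [r2.1, r2.2.1]

def sumaImparesPares (lista1 : List Int) (lista2 : List Int) : List Int :=
  if lista1 = [] ∧ lista2 = [] then [] else pvSumaux lista1 lista2

-- ===== PORT B =====
-- _pairs: consume two elements per step; first of the pair -> impar, second (0 if absent) -> par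
def pvPairs : List Int → Int × Int
  | [] => (0, 0)
  | [x] => (x, 0)
  | x :: y :: rest => let r := pvPairs rest; (x + r.1, y + r.2)

def sumaImparesPares_alt (lista1 : List Int) (lista2 : List Int) : List Int :=
  if lista1 = [] ∧ lista2 = [] then []
  else
    let r1 := pvPairs lista1
    let r2 := pvPairs lista2
    [r1.2 + r2.2, r1.1 + r2.1]

-- ===== PRECONDITION & SPEC =====
def Spec_sumaImparesPares (lista1 : List Int) (lista2 : List Int) (out : List Int) : Prop := out = sumaImparesPares_alt lista1 lista2
instance (lista1 : List Int) (lista2 : List Int) (out : List Int) : Decidable (Spec_sumaImparesPares lista1 lista2 out) := by unfold Spec_sumaImparesPares; infer_instance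

-- ===== CLAIM (what is proved, stated in full; the proofs are below) =====
def Claim_equal_sumaImparesPares : Prop := ∀ (lista1 : List Int) (lista2 : List Int), Dom_sumaImparesPares lista1 lista2 → Spec_sumaImparesPares lista1 lista2 (sumaImparesPares lista1 lista2)

-- ===== LEMMAS AND PROOFS =====
-- A's indexed loop, started at an even counter, computes exactly B's pairwise sums.
theorem pvSumauxLoop_eq_pairs (xs : List Int) (p q c : Int) (hc : c % 2 = 0) :
    pvSumauxLoop xs p q c = (p + (pvPairs xs).2, q + (pvPairs xs).1, c + xs.length) := by
  induction xs using pvPairs.induct generalizing p q c with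
  | case1 => simp [pvSumauxLoop, pvPairs]
  | case2 x =>
      have hd1 : ¬ (2:Int) ∣ (c + 1) := by omega
      simp [pvSumauxLoop, pvPairs, List.foldl, hd1]
  | case3 x y rest ih =>
      have hd1 : ¬ (2:Int) ∣ (c + 1) := by omega
      have hd2 : (2:Int) ∣ (c + 1 + 1) := by omega
      have key := ih (p + y) (q + x) (c + 1 + 1) (by omega)
      simp only [pvSumauxLoop, List.foldl] at key ⊢
      simp only [pvPairs, List.length_cons]
      simp [hd1, hd2] at key ⊢
      rw [key]
      simp only [Prod.mk.injEq]
      refine ⟨by ring, by ring, by ring⟩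

theorem pvSumauxLoop_zero (xs : List Int) (p q : Int) :
    pvSumauxLoop xs p q 0 = (p + (pvPairs xs).2, q + (pvPairs xs).1, (xs.length : Int)) := by
  simpa using pvSumauxLoop_eq_pairs xs p q 0 (by decide)

-- ===== VERDICT (by name: the statement is the Claim_ definition above) =====
theorem sumaImparesPares_spec : Claim_equal_sumaImparesPares := by
  intro lista1 lista2 _
  unfold Spec_sumaImparesPares sumaImparesPares sumaImparesPares_alt
  split
  · rfl
  · simp only [pvSumaux, pvSumauxLoop_zero]
    simp [add_comm]
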